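-- pv_equiv track=rewrite | github.com/snedea/ArcaneAuditor | parser/pmd_preprocessor.py | _has_unclosed_string_delimiters
-- ===== SOURCE A (Python) =====
-- def _has_unclosed_string_delimiters(content: str) -> bool:
--     """Check if content has unclosed string delimiters."""
--     in_string = False
--     string_char = None
--     escape_next = False
--
--     for char in content:
--         if escape_next:
--             escape_next = False
--             continue
--
--         if char == '\\':
--             escape_next = True
--             continue
--
--         if char in ['"', "'", '`']:
--             if not in_string:
--                 in_string = True
--                 string_char = char
--             elif char == string_char:
--                 in_string = False
--                 string_char = None
--
--     return in_string
-- ===== SOURCE B (Python) =====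
-- def _has_unclosed_string_delimiters(content: str) -> bool:
--     """Check if content has unclosed string delimiters."""
--     # Pass 1: drop every backslash together with the character it escapes.
--     effective = []
--     i = 0
--     n = len(content)
--     while i < n:
--         if content[i] == '\\':
--             i += 2  # skip the backslash and the escaped char (trailing backslash: drops nothing more)
--         else:
--             effective.append(content[i])
--             i += 1
--
--     # Pass 2: quote-toggling state machine over the effective characters.
--     in_string = False
--     string_char = None
--     for char in effective:
--         if char in ('"', "'", '`'):
--             if not in_string:
--                 in_string = True
--                 string_char = char
--             elif char == string_char:
--                 in_string = False
--                 string_char = None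
--     return in_string
-- ===== Notes on version B (the rewrite author's own statement) =====
-- stated objective: alternative
-- what changed: Split A's single loop with an escape_next flag into two passes: pass one strips each backslash together with the character it escapes, pass two runs the pure quote-toggling state machine on the remaining characters.
import Mathlib
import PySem

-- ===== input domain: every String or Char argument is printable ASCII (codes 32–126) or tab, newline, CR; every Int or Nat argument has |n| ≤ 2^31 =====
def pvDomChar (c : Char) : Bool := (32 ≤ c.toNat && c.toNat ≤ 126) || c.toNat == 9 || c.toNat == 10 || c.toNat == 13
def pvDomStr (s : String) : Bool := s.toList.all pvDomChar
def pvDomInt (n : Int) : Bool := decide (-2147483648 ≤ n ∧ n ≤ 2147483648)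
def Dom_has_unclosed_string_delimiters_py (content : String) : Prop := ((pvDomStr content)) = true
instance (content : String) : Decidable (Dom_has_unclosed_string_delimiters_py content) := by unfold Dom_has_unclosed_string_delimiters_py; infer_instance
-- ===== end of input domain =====

-- B replaces A's single loop carrying an escape_next flag by two passes: strip escape pairs, then toggle quotes (alternative decomposition, same cost).

-- ===== PORT A =====
-- A's for-loop: state (in_string, string_char, escape_next), one character at a time.
def pvALoop : Bool → Option Char → Bool → List Char → Bool
  | in_string, _, _, [] => in_string
  | in_string, string_char, true, _ :: rest =>
      -- escape_next: consume the char, reset the flag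
      pvALoop in_string string_char false rest
  | in_string, string_char, false, c :: rest =>
      if c = '\\' then pvALoop in_string string_char true rest
      else if c = '"' ∨ c = '\'' ∨ c = '`' then
        if ¬ in_string then pvALoop true (some c) false rest
        else if some c = string_char then pvALoop false none false rest
        else pvALoop in_string string_char false rest
      else pvALoop in_string string_char false rest

def has_unclosed_string_delimiters_py (content : String) : Bool :=
  pvALoop false none false content.toList

-- ===== PORT B =====
-- Pass 1: drop every backslash together with the character it escapes.
def pvEffective : List Char → List Char
  | [] => []
  | c :: rest =>
      if c = '\\' then
        match rest with
        | [] => []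
        | _ :: r => pvEffective r
      else c :: pvEffective rest

-- Pass 2: quote-toggling state machine (no escape handling).
def pvBLoop : Bool → Option Char → List Char → Bool
  | in_string, _, [] => in_string
  | in_string, string_char, c :: rest =>
      if c = '"' ∨ c = '\'' ∨ c = '`' then
        if ¬ in_string then pvBLoop true (some c) rest
        else if some c = string_char then pvBLoop false none rest
        else pvBLoop in_string string_char rest
      else pvBLoop in_string string_char rest

def has_unclosed_string_delimiters_py_alt (content : String) : Bool :=
  pvBLoop false none (pvEffective content.toList)

-- ===== PRECONDITION & SPEC =====
def Spec_has_unclosed_string_delimiters_py (content : String) (out : Bool) : Prop := out = has_unclosed_string_delimiters_py_alt content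
instance (content : String) (out : Bool) : Decidable (Spec_has_unclosed_string_delimiters_py content out) := by unfold Spec_has_unclosed_string_delimiters_py; infer_instance

-- ===== CLAIM (what is proved, stated in full; the proofs are below) =====
def Claim_equal_has_unclosed_string_delimiters_py : Prop := ∀ (content : String), Dom_has_unclosed_string_delimiters_py content → Spec_has_unclosed_string_delimiters_py content (has_unclosed_string_delimiters_py content)

-- ===== LEMMAS AND PROOFS =====
theorem pvLoop_eq (l : List Char) : ∀ (in_string : Bool) (string_char : Option Char),
    pvALoop in_string string_char false l = pvBLoop in_string string_char (pvEffective l) := by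
  induction l using pvEffective.induct with
  | case1 => intro ins sc; simp [pvALoop, pvBLoop, pvEffective]
  | case2 => intro ins sc; simp [pvALoop, pvBLoop, pvEffective]
  | case3 d r ih =>
      intro ins sc
      simp [pvALoop, pvEffective, ih]
  | case4 c rest hc ih =>
      intro ins sc
      have h1 : pvEffective (c :: rest) = c :: pvEffective rest := by
        rw [pvEffective.eq_def]; simp [hc]
      rw [h1]
      simp only [pvALoop, pvBLoop, if_neg hc]
      split_ifs <;> exact ih _ _

-- ===== VERDICT (by name: the statement is the Claim_ definition above) =====
theorem has_unclosed_string_delimiters_py_spec : Claim_equal_has_unclosed_string_delimiters_py := by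
  intro content _
  unfold Spec_has_unclosed_string_delimiters_py has_unclosed_string_delimiters_py has_unclosed_string_delimiters_py_alt
  exact pvLoop_eq _ _ _
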